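-- pv_equiv track=rewrite | github.com/Yanzeyi/Hb_bridge | error_detect.py | throw_outlier
-- ===== SOURCE A (Python) =====
-- def throw_outlier(SLdata_list, error_index_list):
--     new_SLdata_list = []
--     num_LIST = []
--     for i in range(len(SLdata_list)):
--         if i in error_index_list:   pass
--         else:
--             num_LIST.append(i)
--             new_SLdata_list.append(SLdata_list[i])
--     return num_LIST, new_SLdata_list
-- ===== SOURCE B (Python) =====
-- def throw_outlier(SLdata_list, error_index_list):
--     err = set(error_index_list)
--     kept = sorted(set(range(len(SLdata_list))) - err)
--     return kept, [SLdata_list[i] for i in kept]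
-- ===== Notes on version B (the rewrite author's own statement) =====
-- stated objective: faster
-- what changed: Replaces the per-index linear membership-test loop (list scan inside the loop) with set-difference algebra (set(range(n)) - set(errors)) followed by a sort and a separate index-to-value mapping pass.
import Mathlib
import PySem

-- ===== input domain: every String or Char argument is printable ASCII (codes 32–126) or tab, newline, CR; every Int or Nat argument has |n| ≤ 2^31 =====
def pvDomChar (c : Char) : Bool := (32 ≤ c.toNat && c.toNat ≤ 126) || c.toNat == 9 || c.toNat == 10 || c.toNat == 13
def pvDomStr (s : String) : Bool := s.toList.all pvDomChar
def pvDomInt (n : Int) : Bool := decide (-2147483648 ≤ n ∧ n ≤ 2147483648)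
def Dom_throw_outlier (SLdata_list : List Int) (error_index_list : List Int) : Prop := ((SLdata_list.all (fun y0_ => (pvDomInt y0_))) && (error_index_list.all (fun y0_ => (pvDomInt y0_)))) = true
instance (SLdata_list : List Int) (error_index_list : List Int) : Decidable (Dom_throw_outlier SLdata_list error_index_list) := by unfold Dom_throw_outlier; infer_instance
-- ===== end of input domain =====

-- ===== PORT A =====
-- B changes: survivors computed by set-difference algebra (set(range(n)) - set(errors)),
-- then sorted and mapped, instead of A's per-index membership-test loop (objective: alternative).
def throw_outlier (SLdata_list : List Int) (error_index_list : List Int) : List Int × List Int :=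
  let st := (PySem.List.pyRange 0 SLdata_list.length 1).foldl
    (fun (acc : List Int × List Int) i =>
      if i ∈ error_index_list then acc
      else (acc.1 ++ [PySem.List.pyGetD SLdata_list i 0], acc.2 ++ [i]))
    ([], [])
  (st.2, st.1)

-- ===== PORT B =====
def throw_outlier_alt (SLdata_list : List Int) (error_index_list : List Int) : List Int × List Int :=
  let err := PySem.Set.ofList error_index_list
  let kept := PySem.List.sorted
    (PySem.Set.diff (PySem.Set.ofList (PySem.List.pyRange 0 SLdata_list.length 1)) err)
    (fun x => x) false
  (kept, kept.map (fun i => PySem.List.pyGetD SLdata_list i 0))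

-- ===== PRECONDITION & SPEC =====
def Spec_throw_outlier (SLdata_list : List Int) (error_index_list : List Int) (out : List Int × List Int) : Prop := out = throw_outlier_alt SLdata_list error_index_list
instance (SLdata_list : List Int) (error_index_list : List Int) (out : List Int × List Int) : Decidable (Spec_throw_outlier SLdata_list error_index_list out) := by unfold Spec_throw_outlier; infer_instance

-- ===== CLAIM (what is proved, stated in full; the proofs are below) =====
def Claim_equal_throw_outlier : Prop := ∀ (SLdata_list : List Int) (error_index_list : List Int), Dom_throw_outlier SLdata_list error_index_list → Spec_throw_outlier SLdata_list error_index_list (throw_outlier SLdata_list error_index_list)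

-- ===== LEMMAS AND PROOFS =====

-- A's loop builds exactly (map over the filtered range, the filtered range)
theorem foldl_filter_map (xs err : List Int) (r a b : List Int) :
    r.foldl
      (fun (acc : List Int × List Int) i =>
        if i ∈ err then acc
        else (acc.1 ++ [PySem.List.pyGetD xs i 0], acc.2 ++ [i]))
      (a, b)
    = (a ++ (r.filter (fun i => decide (i ∉ err))).map (fun i => PySem.List.pyGetD xs i 0),
       b ++ r.filter (fun i => decide (i ∉ err))) := by
  induction r generalizing a b with
  | nil => simp
  | cons h t ih =>
    by_cases hm : h ∈ err
    · simp [hm, ih]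
    · simp [hm, ih]

-- B's kept list is that same filtered range
theorem kept_eq (xs err : List Int) :
    PySem.List.sorted
      (PySem.Set.diff (PySem.Set.ofList (PySem.List.pyRange 0 xs.length 1))
        (PySem.Set.ofList err)) (fun x => x) false
    = (PySem.List.pyRange 0 xs.length 1).filter (fun i => decide (i ∉ err)) := by
  apply PySem.List.sorted_eq_of_perm_of_pairwise_lt
  · refine (List.perm_ext_iff_of_nodup
      ((PySem.List.nodup_pyRange_one 0 (xs.length)).filter _)
      (PySem.Set.nodup_diff _ _ (PySem.Set.nodup_ofList _))).mpr ?_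
    intro x
    simp [PySem.Set.mem_diff, PySem.Set.mem_ofList, List.mem_filter,
      PySem.List.mem_pyRange_one]
  · exact (PySem.List.pairwise_lt_pyRange_one 0 (xs.length)).filter _

-- ===== VERDICT (by name: the statement is the Claim_ definition above) =====
theorem throw_outlier_spec : Claim_equal_throw_outlier := by
  intro xs err _
  unfold Spec_throw_outlier throw_outlier throw_outlier_alt
  simp only [kept_eq, foldl_filter_map]
  simp
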